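-- pv_equiv track=rewrite | github.com/SanuVishwakarma/Yoga-Pose-Analysis | yoga_analysis.py | extract_pose_name
-- ===== SOURCE A (Python) =====
-- def extract_pose_name(analysis_text):
--     """Extract pose name from the analysis text"""
--     try:
--         # Look for pose name in the first few lines of analysis
--         first_paragraph = analysis_text.split('\n')[0:5]
--         for line in first_paragraph:
--             # Look for common patterns in pose identification
--             if any(x in line.lower() for x in ['pose:', 'asana:', 'position:', 'identified as']):
--                 # Extract the pose name, typically following these markers
--                 pose_name = line.split(':')[-1].strip()
--                 return pose_name
--         # If no specific markers found, take the first sentence that might contain pose name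
--         for line in first_paragraph:
--             if 'pose' in line.lower() or 'asana' in line.lower():
--                 return line.strip()
--         return "Pose name not identified"
--     except:
--         return "Pose name not identified"
-- ===== SOURCE B (Python) =====
-- def extract_pose_name(analysis_text):
--     """Extract pose name from the analysis text"""
--     try:
--         marker = None
--         fallback = None
--         for line in analysis_text.split('\n')[:5]:
--             low = line.lower()
--             if marker is None and any(m in low for m in ('pose:', 'asana:', 'position:', 'identified as')):
--                 marker = line.split(':')[-1].strip()
--             if fallback is None and ('pose' in low or 'asana' in low):
--                 fallback = line.strip()
--         if marker is not None:
--             return marker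
--         if fallback is not None:
--             return fallback
--         return "Pose name not identified"
--     except:
--         return "Pose name not identified"
-- ===== Notes on version B (the rewrite author's own statement) =====
-- stated objective: alternative
-- what changed: A's two sequential scans over the first five lines (one for marker lines, one for pose/asana fallback lines) are merged into a single pass that tracks the first marker candidate and the first fallback candidate in two accumulators and resolves the priority after the loop.
import Mathlib
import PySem

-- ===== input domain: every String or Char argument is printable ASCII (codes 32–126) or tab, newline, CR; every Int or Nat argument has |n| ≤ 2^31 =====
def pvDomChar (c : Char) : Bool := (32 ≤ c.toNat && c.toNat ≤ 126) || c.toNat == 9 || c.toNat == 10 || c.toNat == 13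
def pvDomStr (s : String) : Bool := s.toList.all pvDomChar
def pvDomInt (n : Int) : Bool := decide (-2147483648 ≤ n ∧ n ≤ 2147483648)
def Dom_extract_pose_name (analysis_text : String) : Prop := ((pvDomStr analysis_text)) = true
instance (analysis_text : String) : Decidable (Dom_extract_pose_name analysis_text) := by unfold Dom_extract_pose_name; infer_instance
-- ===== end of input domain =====

-- B merges A's two scans of the first five lines into one pass that tracks both candidates (alternative decomposition, same cost).


-- ===== PORT A =====
-- markers tested by A's first loop
def pvMarkers : List String := ["pose:", "asana:", "position:", "identified as"]

def pvLine1 (l : String) : Bool :=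
  pvMarkers.any (fun x => PySem.Str.isIn x (PySem.Str.lower l))

def pvLine2 (l : String) : Bool :=
  PySem.Str.isIn "pose" (PySem.Str.lower l) || PySem.Str.isIn "asana" (PySem.Str.lower l)

-- line.split(':')[-1].strip()  (split(':') is never empty, so [-1] never raises)
def pvExtract (l : String) : String :=
  PySem.Str.strip (PySem.List.pyGetD ((PySem.Str.split? l ":").getD []) (-1) "")

-- first for-loop of A: returns the first marker line's extracted name
def pvLoop1 : List String → Option String
  | [] => none
  | l :: rest => if pvLine1 l then some (pvExtract l) else pvLoop1 rest

-- second for-loop of A: first line containing 'pose' or 'asana', stripped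
def pvLoop2 : List String → Option String
  | [] => none
  | l :: rest => if pvLine2 l then some (PySem.Str.strip l) else pvLoop2 rest

def extract_pose_name (analysis_text : String) : String :=
  let first_paragraph := ((PySem.Str.split? analysis_text "\n").getD []).take 5
  match pvLoop1 first_paragraph with
  | some r => r
  | none =>
    match pvLoop2 first_paragraph with
    | some r => r
    | none => "Pose name not identified"

-- ===== PORT B =====
-- single pass tracking the first marker candidate and the first fallback candidate
def pvBLoop : List String → Option String → Option String → String
  | [], marker, fallback =>
      ((marker.orElse (fun _ => fallback)).getD "Pose name not identified")
  | l :: rest, marker, fallback =>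
      let m' := if marker.isNone && pvLine1 l then some (pvExtract l) else marker
      let f' := if fallback.isNone && pvLine2 l then some (PySem.Str.strip l) else fallback
      pvBLoop rest m' f'

def extract_pose_name_alt (analysis_text : String) : String :=
  pvBLoop (((PySem.Str.split? analysis_text "\n").getD []).take 5) none none

-- ===== PRECONDITION & SPEC =====
def Spec_extract_pose_name (analysis_text : String) (out : String) : Prop := out = extract_pose_name_alt analysis_text
instance (analysis_text : String) (out : String) : Decidable (Spec_extract_pose_name analysis_text out) := by unfold Spec_extract_pose_name; infer_instance

-- ===== CLAIM (what is proved, stated in full; the proofs are below) =====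
def Claim_equal_extract_pose_name : Prop := ∀ (analysis_text : String), Dom_extract_pose_name analysis_text → Spec_extract_pose_name analysis_text (extract_pose_name analysis_text)

-- ===== LEMMAS AND PROOFS =====

-- ===== VERDICT (by name: the statement is the Claim_ definition above) =====
-- accumulator step: folding one conditional update into the residual first-match
theorem pv_step (m : Option String) (c : Bool) (v : String) (r : Option String) :
    ((if m.isNone && c then some v else m).orElse (fun _ => r))
      = m.orElse (fun _ => if c then some v else r) := by
  cases m <;> cases c <;> simp [Option.orElse]

-- loop invariant: the one-pass loop computes the two residual first-matches
theorem pvBLoop_inv (ls : List String) : ∀ (m f : Option String),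
    pvBLoop ls m f
      = ((m.orElse (fun _ => pvLoop1 ls)).orElse
          (fun _ => f.orElse (fun _ => pvLoop2 ls))).getD "Pose name not identified" := by
  induction ls with
  | nil => intro m f; simp [pvBLoop, pvLoop1, pvLoop2]
  | cons l rest ih =>
    intro m f
    simp only [pvBLoop, ih, pv_step]
    rfl

theorem extract_pose_name_spec : Claim_equal_extract_pose_name := by
  intro t _
  unfold Spec_extract_pose_name extract_pose_name extract_pose_name_alt
  rw [pvBLoop_inv]
  cases h1 : pvLoop1 (((PySem.Str.split? t "\n").getD []).take 5) <;>
    cases h2 : pvLoop2 (((PySem.Str.split? t "\n").getD []).take 5) <;>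
      simp [Option.orElse, h1, h2]
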